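-- pv_equiv track=rewrite | github.com/xuezhezhen/openclaw-workspace | skills/skills/image_ref_harvester/download_refs.py | rank_pages_by_preferred_domain
-- ===== SOURCE A (Python) =====
-- def rank_pages_by_preferred_domain(pages, prefer_domains):
--     if not prefer_domains:
--         return pages
--
--     domains = [d.strip().lower() for d in prefer_domains.split(',')]
--     seen = set()
--     ranked = []
--
--     for domain in domains:
--         for page in pages:
--             if domain in page['source_page_url'].lower() and page['source_page_url'] not in seen:
--                 ranked.append(page)
--                 seen.add(page['source_page_url'])
--
--     for page in pages:
--         if page['source_page_url'] not in seen:
--             ranked.append(page)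
--             seen.add(page['source_page_url'])
--
--     return ranked
-- ===== SOURCE B (Python) =====
-- def rank_pages_by_preferred_domain(pages, prefer_domains):
--     if not prefer_domains:
--         return pages
--     domains = [d.strip().lower() for d in prefer_domains.split(',')]
--     n = len(domains)
--     buckets = [[] for _ in range(n + 1)]
--     urls = set()
--     for page in pages:
--         u = page['source_page_url']
--         if u in urls:
--             continue
--         urls.add(u)
--         low = u.lower()
--         r = next((i for i, d in enumerate(domains) if d in low), n)
--         buckets[r].append(page)
--     return [page for bucket in buckets for page in bucket]
-- ===== Notes on version B (the rewrite author's own statement) =====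
-- stated objective: alternative
-- what changed: A makes one pass over all pages per preferred domain (plus a final pass) guarded by a seen-set; B makes a single pass over the pages, deduplicating by url and dropping each surviving page into a rank bucket (first matching domain index, len(domains) if none), then concatenates the buckets.
import Mathlib
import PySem

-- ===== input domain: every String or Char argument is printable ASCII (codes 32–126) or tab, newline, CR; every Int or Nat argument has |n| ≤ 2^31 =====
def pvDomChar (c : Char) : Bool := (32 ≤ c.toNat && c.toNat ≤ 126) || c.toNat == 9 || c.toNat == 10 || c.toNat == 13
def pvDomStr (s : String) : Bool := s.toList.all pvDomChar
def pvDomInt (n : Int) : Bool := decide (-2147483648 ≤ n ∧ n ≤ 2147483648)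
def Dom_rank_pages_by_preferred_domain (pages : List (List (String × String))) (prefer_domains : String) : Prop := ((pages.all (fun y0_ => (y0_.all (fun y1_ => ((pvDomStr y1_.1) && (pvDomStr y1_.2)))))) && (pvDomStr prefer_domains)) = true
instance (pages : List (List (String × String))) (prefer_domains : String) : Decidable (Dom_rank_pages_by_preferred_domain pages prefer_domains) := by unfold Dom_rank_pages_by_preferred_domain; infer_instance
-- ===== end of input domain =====

-- B replaces A's one-scan-of-all-pages-per-domain (plus a final leftover scan) by a single
-- pass over the pages that deduplicates by url and drops each page into a rank bucket
-- (first matching domain index); same return value on all inputs admitted by Pre_.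

-- ===== PORT A =====
-- page['source_page_url'] in total form; Pre_ guarantees the key is present wherever A reads it
def pvUrl (page : List (String × String)) : String :=
  ((PySem.Dict.mk page).get? "source_page_url").getD ""

-- [d.strip().lower() for d in prefer_domains.split(',')]
def pvParseDomains (prefer_domains : String) : List String :=
  ((PySem.Str.split? prefer_domains ",").getD []).map (fun d => PySem.Str.lower (PySem.Str.strip d))

-- body of A's inner loop over pages (for one domain)
def pvStepA (domain : String) (st : PySem.Set String × List (List (String × String)))
    (page : List (String × String)) : PySem.Set String × List (List (String × String)) :=
  if PySem.Str.isIn domain (PySem.Str.lower (pvUrl page)) && !(PySem.Set.contains st.1 (pvUrl page)) then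
    (PySem.Set.add st.1 (pvUrl page), st.2 ++ [page])
  else st

-- body of A's final loop over pages
def pvStepFin (st : PySem.Set String × List (List (String × String)))
    (page : List (String × String)) : PySem.Set String × List (List (String × String)) :=
  if !(PySem.Set.contains st.1 (pvUrl page)) then
    (PySem.Set.add st.1 (pvUrl page), st.2 ++ [page])
  else st

def rank_pages_by_preferred_domain (pages : List (List (String × String))) (prefer_domains : String) : List (List (String × String)) :=
  if prefer_domains == "" then pages
  else
    let domains := pvParseDomains prefer_domains
    let st1 := domains.foldl (fun st domain => pages.foldl (pvStepA domain) st) (PySem.Set.empty, [])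
    (pages.foldl pvStepFin st1).2

-- ===== PORT B =====
-- next((i for i, d in enumerate(domains) if d in low), len(domains))
def pvRank : List String → String → Nat
  | [], _ => 0
  | d :: ds, low => if PySem.Str.isIn d low then 0 else pvRank ds low + 1

-- body of B's single loop over pages
def pvStepB (domains : List String)
    (st : List (List (List (String × String))) × PySem.Set String)
    (page : List (String × String)) : List (List (List (String × String))) × PySem.Set String :=
  if PySem.Set.contains st.2 (pvUrl page) then st
  else
    (st.1.modify (pvRank domains (PySem.Str.lower (pvUrl page))) (fun b => b ++ [page]),
     PySem.Set.add st.2 (pvUrl page))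

def rank_pages_by_preferred_domain_alt (pages : List (List (String × String))) (prefer_domains : String) : List (List (String × String)) :=
  if prefer_domains == "" then pages
  else
    let domains := pvParseDomains prefer_domains
    (pages.foldl (pvStepB domains) (List.replicate (domains.length + 1) [], PySem.Set.empty)).1.flatten

-- ===== PRECONDITION & SPEC =====
-- Pre_ excludes exactly the inputs on which Python A raises KeyError: a nonempty
-- prefer_domains together with some page lacking the 'source_page_url' key.
def Pre_rank_pages_by_preferred_domain (pages : List (List (String × String))) (prefer_domains : String) : Prop :=
  prefer_domains ≠ "" → ∀ page ∈ pages, ((PySem.Dict.mk page).get? "source_page_url").isSome = true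
instance (pages : List (List (String × String))) (prefer_domains : String) : Decidable (Pre_rank_pages_by_preferred_domain pages prefer_domains) := by unfold Pre_rank_pages_by_preferred_domain; infer_instance

def pvWitness_rank_pages_by_preferred_domain : (List (List (String × String))) × String :=
  ([[("source_page_url", "http://a.com/x")], [("source_page_url", "http://b.org/y")]], "b.org,a.com")

def Spec_rank_pages_by_preferred_domain (pages : List (List (String × String))) (prefer_domains : String) (out : List (List (String × String))) : Prop := out = rank_pages_by_preferred_domain_alt pages prefer_domains
instance (pages : List (List (String × String))) (prefer_domains : String) (out : List (List (String × String))) : Decidable (Spec_rank_pages_by_preferred_domain pages prefer_domains out) := by unfold Spec_rank_pages_by_preferred_domain; infer_instance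

-- ===== CLAIM (what is proved, stated in full; the proofs are below) =====
def Claim_equal_rank_pages_by_preferred_domain : Prop := ∀ (pages : List (List (String × String))) (prefer_domains : String), Dom_rank_pages_by_preferred_domain pages prefer_domains → Pre_rank_pages_by_preferred_domain pages prefer_domains → Spec_rank_pages_by_preferred_domain pages prefer_domains (rank_pages_by_preferred_domain pages prefer_domains)

-- ===== LEMMAS AND PROOFS =====

lemma pvNotMemOfContainsFalse {s : List String} {u : String}
    (h : PySem.Set.contains s u = false) : u ∉ s := by
  intro hm
  rw [(PySem.Set.contains_iff s u).mpr hm] at h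
  exact Bool.noConfusion h

lemma pvContainsEqFalse {s : List String} {u : String} (h : u ∉ s) :
    PySem.Set.contains s u = false := by
  cases hc : PySem.Set.contains s u
  · rfl
  · exact absurd ((PySem.Set.contains_iff s u).mp hc) h

-- the pages A's inner loop (domain d, seen s) appends, in order
def pvSel (d : String) : List (List (String × String)) → List String → List (List (String × String))
  | [], _ => []
  | p :: ps, s =>
    if PySem.Str.isIn d (PySem.Str.lower (pvUrl p)) && !(PySem.Set.contains s (pvUrl p)) then
      p :: pvSel d ps (s ++ [pvUrl p])
    else pvSel d ps s

-- first occurrence per url among pages whose url is not in s (what A's final loop appends)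
def pvDedup : List (List (String × String)) → List String → List (List (String × String))
  | [], _ => []
  | p :: ps, s =>
    if PySem.Set.contains s (pvUrl p) then pvDedup ps s
    else p :: pvDedup ps (s ++ [pvUrl p])

-- everything A's outer loop appends over the remaining domains ds, starting from seen s
def pvChain (pages : List (List (String × String))) : List String → List String → List (List (String × String))
  | [], _ => []
  | d :: ds, s => pvSel d pages s ++ pvChain pages ds (s ++ (pvSel d pages s).map pvUrl)

-- rank-bucket concatenation, recursively: matching pages first, then the rest bucketed
def pvBuck : List String → List (List (String × String)) → List (List (String × String))
  | [], R => R
  | d :: ds, R =>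
    R.filter (fun p => PySem.Str.isIn d (PySem.Str.lower (pvUrl p)))
      ++ pvBuck ds (R.filter (fun p => !PySem.Str.isIn d (PySem.Str.lower (pvUrl p))))

-- B's buckets, as filters by rank
def pvGroups (domains : List String) (R : List (List (String × String))) : List (List (List (String × String))) :=
  (List.range (domains.length + 1)).map
    (fun i => R.filter (fun p => decide (pvRank domains (PySem.Str.lower (pvUrl p)) = i)))

lemma pvSel_cons_mem {d : String} {p : List (String × String)} (ps : List (List (String × String))) {s : List String}
    (hs : pvUrl p ∈ s) : pvSel d (p :: ps) s = pvSel d ps s := by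
  simp only [pvSel, (PySem.Set.contains_iff s (pvUrl p)).mpr hs]
  simp

lemma pvSel_cons_nomatch {d : String} {p : List (String × String)} (ps : List (List (String × String))) {s : List String}
    (hm : PySem.Str.isIn d (PySem.Str.lower (pvUrl p)) = false) : pvSel d (p :: ps) s = pvSel d ps s := by
  simp only [pvSel, hm]
  simp

lemma pvSel_cons_pos {d : String} {p : List (String × String)} (ps : List (List (String × String))) {s : List String}
    (hm : PySem.Str.isIn d (PySem.Str.lower (pvUrl p)) = true) (hs : pvUrl p ∉ s) :
    pvSel d (p :: ps) s = p :: pvSel d ps (s ++ [pvUrl p]) := by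
  simp only [pvSel, hm, pvContainsEqFalse hs]
  simp

lemma pvDedup_cons_mem {p : List (String × String)} (ps : List (List (String × String))) {s : List String}
    (hs : pvUrl p ∈ s) : pvDedup (p :: ps) s = pvDedup ps s := by
  simp only [pvDedup, (PySem.Set.contains_iff s (pvUrl p)).mpr hs]
  simp

lemma pvDedup_cons_new {p : List (String × String)} (ps : List (List (String × String))) {s : List String}
    (hs : pvUrl p ∉ s) : pvDedup (p :: ps) s = p :: pvDedup ps (s ++ [pvUrl p]) := by
  simp only [pvDedup, pvContainsEqFalse hs]
  simp

lemma pvDedup_congr (pages : List (List (String × String))) : ∀ s t : List String,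
    (∀ u, u ∈ s ↔ u ∈ t) → pvDedup pages s = pvDedup pages t := by
  induction pages with
  | nil => intro s t _; rfl
  | cons p ps ih =>
    intro s t h
    by_cases hs : pvUrl p ∈ s
    · have ht : pvUrl p ∈ t := (h _).mp hs
      simp [pvDedup, hs, ht, ih s t h]
    · have ht : pvUrl p ∉ t := fun hx => hs ((h _).mpr hx)
      have h' : ∀ u, u ∈ s ++ [pvUrl p] ↔ u ∈ t ++ [pvUrl p] := by
        intro u; simp [List.mem_append, h u]
      simp [pvDedup, hs, ht, ih _ _ h']

lemma pvDedup_append (pages : List (List (String × String))) (s : List String) : ∀ t : List String,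
    pvDedup pages (s ++ t) = (pvDedup pages t).filter (fun p => !(PySem.Set.contains s (pvUrl p))) := by
  induction pages with
  | nil => intro t; rfl
  | cons p ps ih =>
    intro t
    by_cases hs : pvUrl p ∈ s
    · by_cases ht : pvUrl p ∈ t
      · simp [pvDedup, hs, ht, ih]
      · have hcong : pvDedup ps (s ++ t) = pvDedup ps (s ++ (t ++ [pvUrl p])) := by
          apply pvDedup_congr
          intro u
          constructor
          · intro hu; rcases List.mem_append.mp hu with h | h
            · exact List.mem_append.mpr (Or.inl h)
            · exact List.mem_append.mpr (Or.inr (List.mem_append.mpr (Or.inl h)))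
          · intro hu
            rcases List.mem_append.mp hu with h | h
            · exact List.mem_append.mpr (Or.inl h)
            · rcases List.mem_append.mp h with h | h
              · exact List.mem_append.mpr (Or.inr h)
              · have : u = pvUrl p := by simpa using h
                exact List.mem_append.mpr (Or.inl (this ▸ hs))
        simp [pvDedup, hs, ht, hcong, ih]
    · by_cases ht : pvUrl p ∈ t
      · simp [pvDedup, hs, ht, ih]
      · have hassoc : (s ++ t) ++ [pvUrl p] = s ++ (t ++ [pvUrl p]) := by
          simp [List.append_assoc]
        simp [pvDedup, hs, ht, hassoc, ih]

lemma pvSel_eq_filter (d : String) (pages : List (List (String × String))) : ∀ s t : List String,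
    (∀ u, u ∈ s → u ∈ t) →
    (∀ p ∈ pages, pvUrl p ∈ t → pvUrl p ∉ s → PySem.Str.isIn d (PySem.Str.lower (pvUrl p)) = false) →
    pvSel d pages s = (pvDedup pages t).filter (fun p => PySem.Str.isIn d (PySem.Str.lower (pvUrl p))) := by
  induction pages with
  | nil => intro s t _ _; rfl
  | cons p ps ih =>
    intro s t hst hno
    have hnoTail : ∀ q ∈ ps, pvUrl q ∈ t → pvUrl q ∉ s → PySem.Str.isIn d (PySem.Str.lower (pvUrl q)) = false :=
      fun q hq => hno q (List.mem_cons_of_mem _ hq)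
    by_cases hsm : pvUrl p ∈ s
    · have htm : pvUrl p ∈ t := hst _ hsm
      rw [pvSel_cons_mem ps hsm, pvDedup_cons_mem ps htm]
      exact ih s t hst hnoTail
    · by_cases htm : pvUrl p ∈ t
      · have hm : PySem.Str.isIn d (PySem.Str.lower (pvUrl p)) = false :=
          hno p List.mem_cons_self htm hsm
        rw [pvSel_cons_nomatch ps hm, pvDedup_cons_mem ps htm]
        exact ih s t hst hnoTail
      · have hext : ∀ u, u ∈ s ++ [pvUrl p] → u ∈ t ++ [pvUrl p] := by
          intro u hu
          rcases List.mem_append.mp hu with h | h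
          · exact List.mem_append.mpr (Or.inl (hst _ h))
          · exact List.mem_append.mpr (Or.inr h)
        cases hm : PySem.Str.isIn d (PySem.Str.lower (pvUrl p)) with
        | true =>
          have hno' : ∀ q ∈ ps, pvUrl q ∈ t ++ [pvUrl p] → pvUrl q ∉ s ++ [pvUrl p] →
              PySem.Str.isIn d (PySem.Str.lower (pvUrl q)) = false := by
            intro q hq hqt hqs
            have hq1 : pvUrl q ∉ s := fun h => hqs (List.mem_append.mpr (Or.inl h))
            rcases List.mem_append.mp hqt with h | h
            · exact hnoTail q hq h hq1
            · exact absurd (List.mem_append.mpr (Or.inr h)) hqs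
          rw [pvSel_cons_pos ps hm hsm, pvDedup_cons_new ps htm,
            List.filter_cons_of_pos (p := fun q => PySem.Str.isIn d (PySem.Str.lower (pvUrl q))) hm]
          exact congrArg (p :: ·) (ih _ _ hext hno')
        | false =>
          have hno'' : ∀ q ∈ ps, pvUrl q ∈ t ++ [pvUrl p] → pvUrl q ∉ s →
              PySem.Str.isIn d (PySem.Str.lower (pvUrl q)) = false := by
            intro q hq hqt hqs
            rcases List.mem_append.mp hqt with h | h
            · exact hnoTail q hq h hqs
            · have hqu : pvUrl q = pvUrl p := by simpa using h
              rw [hqu]; exact hm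
          rw [pvSel_cons_nomatch ps hm, pvDedup_cons_new ps htm,
            List.filter_cons_of_neg (p := fun q => PySem.Str.isIn d (PySem.Str.lower (pvUrl q)))
              (by simp only [hm]; simp)]
          exact ih s (t ++ [pvUrl p]) (fun u hu => List.mem_append.mpr (Or.inl (hst _ hu))) hno''

lemma foldl_stepA (d : String) (pages : List (List (String × String))) : ∀ (s : List String) (acc : List (List (String × String))),
    pages.foldl (pvStepA d) (s, acc) = (s ++ (pvSel d pages s).map pvUrl, acc ++ pvSel d pages s) := by
  induction pages with
  | nil => intro s acc; simp [pvSel]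
  | cons p ps ih =>
    intro s acc
    cases hc : PySem.Str.isIn d (PySem.Str.lower (pvUrl p)) && !(PySem.Set.contains s (pvUrl p)) with
    | true =>
      have hcc := hc
      simp only [Bool.and_eq_true, Bool.not_eq_true'] at hcc
      have hadd : PySem.Set.add s (pvUrl p) = s ++ [pvUrl p] := by
        simp [PySem.Set.add, pvNotMemOfContainsFalse hcc.2]
      simp only [List.foldl_cons, pvStepA, hc, if_true, hadd, pvSel, ih]
      simp [List.append_assoc]
    | false =>
      simp only [List.foldl_cons, pvStepA, hc, Bool.false_eq_true, if_false, pvSel, ih]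

lemma foldl_stepFin (pages : List (List (String × String))) : ∀ (s : List String) (acc : List (List (String × String))),
    pages.foldl pvStepFin (s, acc) = (s ++ (pvDedup pages s).map pvUrl, acc ++ pvDedup pages s) := by
  induction pages with
  | nil => intro s acc; simp [pvDedup]
  | cons p ps ih =>
    intro s acc
    cases hc : PySem.Set.contains s (pvUrl p) with
    | true =>
      simp only [List.foldl_cons, pvStepFin, hc, Bool.not_true, Bool.false_eq_true, if_false, pvDedup, if_true, ih]
    | false =>
      have hadd : PySem.Set.add s (pvUrl p) = s ++ [pvUrl p] := by
        simp [PySem.Set.add, pvNotMemOfContainsFalse hc]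
      simp only [List.foldl_cons, pvStepFin, hc, Bool.not_false, if_true, hadd, pvDedup, Bool.false_eq_true, if_false, ih]
      simp [List.append_assoc]

lemma foldl_passes (pages : List (List (String × String))) : ∀ (ds : List String) (s : List String) (acc : List (List (String × String))),
    ds.foldl (fun st domain => pages.foldl (pvStepA domain) st) (s, acc)
      = (s ++ (pvChain pages ds s).map pvUrl, acc ++ pvChain pages ds s) := by
  intro ds
  induction ds with
  | nil => intro s acc; simp [pvChain]
  | cons d ds ih =>
    intro s acc
    simp only [List.foldl_cons, foldl_stepA, ih, pvChain]
    simp [List.append_assoc]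

lemma dedup_after_sel (d : String) (pages : List (List (String × String))) (s : List String) :
    pvDedup pages (s ++ ((pvDedup pages s).filter (fun p => PySem.Str.isIn d (PySem.Str.lower (pvUrl p)))).map pvUrl)
      = (pvDedup pages s).filter (fun p => !PySem.Str.isIn d (PySem.Str.lower (pvUrl p))) := by
  set K := ((pvDedup pages s).filter (fun p => PySem.Str.isIn d (PySem.Str.lower (pvUrl p)))).map pvUrl with hK
  have h1 : pvDedup pages (s ++ K) = pvDedup pages (K ++ s) := by
    apply pvDedup_congr
    intro u
    simp [List.mem_append, or_comm]
  rw [h1, pvDedup_append]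
  apply List.filter_congr
  intro p hp
  congr 1
  cases hm : PySem.Str.isIn d (PySem.Str.lower (pvUrl p)) with
  | true =>
    have : pvUrl p ∈ K := by
      rw [hK]
      exact List.mem_map.mpr ⟨p, List.mem_filter.mpr ⟨hp, hm⟩, rfl⟩
    exact (PySem.Set.contains_iff K (pvUrl p)).mpr this
  | false =>
    cases hc : PySem.Set.contains K (pvUrl p) with
    | true =>
      exfalso
      have := (PySem.Set.contains_iff K (pvUrl p)).mp hc
      rw [hK] at this
      rcases List.mem_map.mp this with ⟨q, hq, hqu⟩
      have hqm := (List.mem_filter.mp hq).2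
      rw [hqu] at hqm
      rw [hm] at hqm
      exact absurd hqm (by simp)
    | false => rfl

lemma chain_buck (pages : List (List (String × String))) : ∀ (ds : List String) (s : List String),
    pvChain pages ds s ++ pvDedup pages (s ++ (pvChain pages ds s).map pvUrl) = pvBuck ds (pvDedup pages s) := by
  intro ds
  induction ds with
  | nil => intro s; simp [pvChain, pvBuck]
  | cons d ds ih =>
    intro s
    have hsel : pvSel d pages s = (pvDedup pages s).filter (fun p => PySem.Str.isIn d (PySem.Str.lower (pvUrl p))) :=
      pvSel_eq_filter d pages s s (fun u hu => hu) (fun p _ h1 h2 => absurd h1 h2)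
    calc pvChain pages (d :: ds) s ++ pvDedup pages (s ++ (pvChain pages (d :: ds) s).map pvUrl)
        = pvSel d pages s ++ (pvChain pages ds (s ++ (pvSel d pages s).map pvUrl)
            ++ pvDedup pages ((s ++ (pvSel d pages s).map pvUrl) ++ (pvChain pages ds (s ++ (pvSel d pages s).map pvUrl)).map pvUrl)) := by
          simp [pvChain, List.append_assoc]
      _ = pvSel d pages s ++ pvBuck ds (pvDedup pages (s ++ (pvSel d pages s).map pvUrl)) := by
          rw [ih]
      _ = pvBuck (d :: ds) (pvDedup pages s) := by
          rw [hsel, dedup_after_sel]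
          simp [pvBuck]

lemma buck_groups : ∀ (domains : List String) (R : List (List (String × String))),
    pvBuck domains R = (pvGroups domains R).flatten := by
  intro domains
  induction domains with
  | nil =>
    intro R
    simp [pvBuck, pvGroups, pvRank, List.range_one]
  | cons d ds ih =>
    intro R
    have h0 : R.filter (fun p => decide (pvRank (d :: ds) (PySem.Str.lower (pvUrl p)) = 0))
        = R.filter (fun p => PySem.Str.isIn d (PySem.Str.lower (pvUrl p))) := by
      apply List.filter_congr
      intro p _
      cases hm : PySem.Str.isIn d (PySem.Str.lower (pvUrl p))
      · simp only [pvRank, hm]; simp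
      · simp only [pvRank, hm]; simp
    have hsucc : ∀ i : ℕ, R.filter (fun p => decide (pvRank (d :: ds) (PySem.Str.lower (pvUrl p)) = i + 1))
        = (R.filter (fun p => !PySem.Str.isIn d (PySem.Str.lower (pvUrl p)))).filter
            (fun p => decide (pvRank ds (PySem.Str.lower (pvUrl p)) = i)) := by
      intro i
      rw [List.filter_filter]
      apply List.filter_congr
      intro p _
      cases hm : PySem.Str.isIn d (PySem.Str.lower (pvUrl p))
      · simp only [pvRank, hm]; simp
      · simp only [pvRank, hm]; simp
    have hmain : pvGroups (d :: ds) R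
        = (R.filter (fun p => PySem.Str.isIn d (PySem.Str.lower (pvUrl p))))
          :: pvGroups ds (R.filter (fun p => !PySem.Str.isIn d (PySem.Str.lower (pvUrl p)))) := by
      apply List.ext_getElem
      · simp [pvGroups]
      · intro i h1 h2
        cases i with
        | zero =>
          simp only [pvGroups, List.getElem_map, List.getElem_range, List.getElem_cons_zero]
          exact h0
        | succ j =>
          simp only [pvGroups, List.getElem_map, List.getElem_range, List.getElem_cons_succ]
          exact hsucc j
    simp only [pvBuck]
    rw [hmain, List.flatten_cons, ih]

lemma zipWith_groups_step (bs : List (List (List (String × String)))) (domains : List String)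
    (p : List (String × String)) (d' : List (List (String × String))) :
    List.zipWith (fun a b => a ++ b) bs (pvGroups domains (p :: d'))
      = List.zipWith (fun a b => a ++ b) (bs.modify (pvRank domains (PySem.Str.lower (pvUrl p))) (fun b => b ++ [p])) (pvGroups domains d') := by
  apply List.ext_getElem
  · simp [List.length_zipWith, pvGroups, List.length_modify]
  · intro i h1 h2
    have hb : i < bs.length := by
      simp [List.length_zipWith] at h1; omega
    have hg : i < (pvGroups domains (p :: d')).length := by
      simp [List.length_zipWith] at h1; simp [pvGroups]; simp [pvGroups] at h1; omega
    simp only [List.getElem_zipWith, List.getElem_modify]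
    simp only [pvGroups, List.getElem_map, List.getElem_range]
    by_cases hi : pvRank domains (PySem.Str.lower (pvUrl p)) = i
    · rw [List.filter_cons_of_pos (by simp [hi])]
      simp [hi, List.append_assoc]
    · rw [List.filter_cons_of_neg (by simp [hi])]
      simp [hi]

lemma foldl_stepB (domains : List String) (pages : List (List (String × String))) :
    ∀ (bs : List (List (List (String × String)))) (s : List String), bs.length = domains.length + 1 →
    pages.foldl (pvStepB domains) (bs, s)
      = (List.zipWith (fun a b => a ++ b) bs (pvGroups domains (pvDedup pages s)), s ++ (pvDedup pages s).map pvUrl) := by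
  induction pages with
  | nil =>
    intro bs s hlen
    simp only [List.foldl_nil, pvDedup]
    have : List.zipWith (fun a b => a ++ b) bs (pvGroups domains []) = bs := by
      apply List.ext_getElem
      · simp [List.length_zipWith, pvGroups, hlen]
      · intro i h1 h2
        simp only [List.getElem_zipWith, pvGroups, List.getElem_map, List.filter_nil,
          List.append_nil]
    simp [this]
  | cons p ps ih =>
    intro bs s hlen
    cases hc : PySem.Set.contains s (pvUrl p) with
    | true =>
      simp only [List.foldl_cons, pvStepB, hc, if_true, pvDedup, ih bs s hlen]
    | false =>
      have hadd : PySem.Set.add s (pvUrl p) = s ++ [pvUrl p] := by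
        simp [PySem.Set.add, pvNotMemOfContainsFalse hc]
      have hlen2 : (bs.modify (pvRank domains (PySem.Str.lower (pvUrl p))) (fun b => b ++ [p])).length = domains.length + 1 := by
        simp [List.length_modify, hlen]
      simp only [List.foldl_cons, pvStepB, hc, Bool.false_eq_true, if_false, hadd, pvDedup, ih _ _ hlen2]
      rw [zipWith_groups_step]
      simp [List.append_assoc]

lemma zipWith_replicate_nil (g : List (List (List (String × String)))) :
    List.zipWith (fun a b => a ++ b) (List.replicate g.length ([] : List (List (String × String)))) g = g := by
  induction g with
  | nil => rfl
  | cons x xs ih => simp [List.replicate_succ, ih]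

-- ===== VERDICT (by name: the statement is the Claim_ definition above) =====
theorem rank_pages_by_preferred_domain_spec : Claim_equal_rank_pages_by_preferred_domain := by
  intro pages prefer_domains _ _
  unfold Spec_rank_pages_by_preferred_domain
  unfold rank_pages_by_preferred_domain rank_pages_by_preferred_domain_alt
  by_cases hp : prefer_domains == ""
  · simp [hp]
  · simp only [hp, Bool.false_eq_true, if_false]
    rw [foldl_passes, foldl_stepFin]
    have hA : (pvChain pages (pvParseDomains prefer_domains) PySem.Set.empty)
        ++ pvDedup pages (PySem.Set.empty ++ (pvChain pages (pvParseDomains prefer_domains) PySem.Set.empty).map pvUrl)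
        = pvBuck (pvParseDomains prefer_domains) (pvDedup pages PySem.Set.empty) :=
      chain_buck pages (pvParseDomains prefer_domains) PySem.Set.empty
    rw [foldl_stepB _ _ _ _ (by simp)]
    have hlen : (List.replicate ((pvParseDomains prefer_domains).length + 1) ([] : List (List (String × String))))
        = List.replicate (pvGroups (pvParseDomains prefer_domains) (pvDedup pages PySem.Set.empty)).length [] := by
      simp [pvGroups]
    rw [hlen, zipWith_replicate_nil, ← buck_groups, ← hA]
    simp [PySem.Set.empty]
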